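-- pv_equiv track=rewrite | github.com/RamezIssac/django-erp-framework | ra/reporting/helpers.py | apply_order_to_list
-- ===== SOURCE A (Python) =====
-- def apply_order_to_list(lst, order_list):
--     values = []
--     unordered = list(lst)
--     for o in order_list:
--         o = o.strip()
--         if o in lst:
--             values.append(o)
--             try:
--                 unordered.remove(o)
--             except ValueError:
--                 pass
--     values += unordered
--     return values
-- ===== SOURCE B (Python) =====
-- def apply_order_to_list(lst, order_list):
--     members = set(lst)
--     values = []
--     removals = {}
--     for o in order_list:
--         o = o.strip()
--         if o in members:
--             values.append(o)
--             removals[o] = removals.get(o, 0) + 1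
--     rest = []
--     for x in lst:
--         r = removals.get(x, 0)
--         if r:
--             removals[x] = r - 1
--         else:
--             rest.append(x)
--     return values + rest
-- ===== Notes on version B (the rewrite author's own statement) =====
-- stated objective: faster
-- what changed: Replaced the per-item 'o in lst' scan and list.remove (each O(n)) by a set membership test plus an occurrence-count dict, then one linear pass over lst that skips the counted first occurrences to build the remainder.
import Mathlib
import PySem

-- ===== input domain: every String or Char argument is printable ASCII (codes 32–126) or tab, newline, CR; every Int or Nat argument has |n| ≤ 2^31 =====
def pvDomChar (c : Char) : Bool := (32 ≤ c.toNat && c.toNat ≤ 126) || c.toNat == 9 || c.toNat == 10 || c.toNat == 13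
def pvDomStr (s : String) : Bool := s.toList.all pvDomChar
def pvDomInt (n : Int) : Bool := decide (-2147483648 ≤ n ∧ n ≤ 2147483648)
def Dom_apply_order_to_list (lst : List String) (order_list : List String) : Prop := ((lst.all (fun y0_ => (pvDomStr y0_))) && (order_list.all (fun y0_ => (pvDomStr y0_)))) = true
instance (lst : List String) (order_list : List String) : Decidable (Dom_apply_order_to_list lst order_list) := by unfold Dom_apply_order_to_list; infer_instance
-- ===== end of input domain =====

-- B replaces A's per-item list scans (membership + list.remove) by a set and an
-- occurrence-count dict plus one linear remainder pass: asymptotically faster (O(m+n) vs O(m*n)).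

-- ===== PORT A =====
def apply_order_to_list (lst : List String) (order_list : List String) : List String :=
  let st := order_list.foldl (fun (s : List String × List String) o =>
    let o' := PySem.Str.strip o
    if o' ∈ lst then
      (s.1 ++ [o'],
       match PySem.List.remove? s.2 o' with
       | some u => u          -- unordered.remove(o)
       | none => s.2)         -- except ValueError: pass
    else s) ([], lst)
  st.1 ++ st.2

-- ===== PORT B =====
def apply_order_to_list_alt (lst : List String) (order_list : List String) : List String :=
  let members := PySem.Set.ofList lst
  let st := order_list.foldl (fun (s : List String × PySem.Dict String Int) o =>
    let o' := PySem.Str.strip o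
    if o' ∈ members then
      (s.1 ++ [o'], s.2.insert o' (s.2.getD o' 0 + 1))
    else s) ([], PySem.Dict.empty)
  let rest := (lst.foldl (fun (s : List String × PySem.Dict String Int) x =>
    let r := s.2.getD x 0
    if r ≠ 0 then (s.1, s.2.insert x (r - 1)) else (s.1 ++ [x], s.2)) ([], st.2)).1
  st.1 ++ rest

-- ===== PRECONDITION & SPEC =====
def Spec_apply_order_to_list (lst : List String) (order_list : List String) (out : List String) : Prop := out = apply_order_to_list_alt lst order_list
instance (lst : List String) (order_list : List String) (out : List String) : Decidable (Spec_apply_order_to_list lst order_list out) := by unfold Spec_apply_order_to_list; infer_instance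

-- ===== CLAIM (what is proved, stated in full; the proofs are below) =====
def Claim_equal_apply_order_to_list : Prop := ∀ (lst : List String) (order_list : List String), Dom_apply_order_to_list lst order_list → Spec_apply_order_to_list lst order_list (apply_order_to_list lst order_list)

-- ===== LEMMAS AND PROOFS =====

-- abstract "skip the first (f x) occurrences of each x" view of B's remainder pass
def skipF (f : String → Int) : List String → List String
  | [] => []
  | x :: xs => if f x ≠ 0 then skipF (Function.update f x (f x - 1)) xs
               else x :: skipF f xs

theorem skipF_congr (f g : String → Int) (h : f = g) (l : List String) :
    skipF f l = skipF g l := by rw [h]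

theorem skipF_zero (l : List String) : skipF (fun _ => 0) l = l := by
  induction l with
  | nil => rfl
  | cons x xs ih => simp [skipF, ih]

theorem getD_fun_insert (d : PySem.Dict String Int) (k : String) (v : Int) :
    (fun x => (d.insert k v).getD x 0) = Function.update (fun x => d.getD x 0) k v := by
  funext x
  by_cases hx : x = k
  · subst hx; simp [PySem.Dict.getD_insert_self]
  · rw [PySem.Dict.getD_insert_of_ne d v 0 hx]
    simp [Function.update, hx]

-- B's second pass computes skipF
theorem restPass_eq (l : List String) (acc : List String) (d : PySem.Dict String Int) :
    (l.foldl (fun (s : List String × PySem.Dict String Int) x =>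
        let r := s.2.getD x 0
        if r ≠ 0 then (s.1, s.2.insert x (r - 1)) else (s.1 ++ [x], s.2)) (acc, d)).1
      = acc ++ skipF (fun x => d.getD x 0) l := by
  induction l generalizing acc d with
  | nil => simp [skipF]
  | cons x xs ih =>
      simp only [List.foldl_cons]
      by_cases h : d.getD x 0 ≠ 0
      · rw [if_pos h, ih, skipF, if_pos (by simpa using h),
          skipF_congr _ _ (getD_fun_insert d x (d.getD x 0 - 1)) xs]
      · rw [if_neg h, ih, skipF, if_neg (by simpa using h)]
        simp

-- incrementing one count = removing the first occurrence from the skipped list (when present)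
theorem skipF_inc (l : List String) (f : String → Int) (o : String) (hf : ∀ x, 0 ≤ f x) :
    skipF (Function.update f o (f o + 1)) l
      = (match PySem.List.remove? (skipF f l) o with
         | some u => u
         | none => skipF f l) := by
  induction l generalizing f with
  | nil => simp [skipF, PySem.List.remove?]
  | cons x xs ih =>
      by_cases hx : x = o
      · subst hx
        have h1 : Function.update f x (f x + 1) x = f x + 1 := by simp
        have hpos : f x + 1 ≠ 0 := by have := hf x; omega
        by_cases h0 : f x = 0
        · have e1 : Function.update (Function.update f x (f x + 1)) x
              (Function.update f x (f x + 1) x - 1) = f := by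
            funext y; by_cases hy : y = x <;> simp [Function.update, hy]
          rw [skipF, if_pos (by rw [h1]; exact hpos), skipF_congr _ _ e1 xs,
            skipF, if_neg (by simpa using h0), PySem.List.remove?_cons_self]
        · have e1 : Function.update (Function.update f x (f x + 1)) x
              (Function.update f x (f x + 1) x - 1)
              = Function.update (Function.update f x (f x - 1)) x
                  (Function.update f x (f x - 1) x + 1) := by
            funext y; by_cases hy : y = x <;> simp [Function.update, hy]
          rw [skipF, if_pos (by rw [h1]; exact hpos), skipF_congr _ _ e1 xs,
            ih _ (by intro y; by_cases hy : y = x <;> simp [Function.update, hy] <;>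
              [skip; exact hf y] <;> have := hf x <;> omega),
            skipF, if_pos (by simpa using h0)]
      · have h1 : Function.update f o (f o + 1) x = f x := by
          simp [Function.update, hx]
        by_cases h0 : f x = 0
        · rw [skipF, if_neg (by rw [h1]; simpa using h0), skipF,
            if_neg (by simpa using h0),
            PySem.List.remove?_cons_of_ne _ hx, ih f hf]
          cases PySem.List.remove? (skipF f xs) o <;> simp
        · have e1 : Function.update (Function.update f o (f o + 1)) x
              (Function.update f o (f o + 1) x - 1)
              = Function.update (Function.update f x (f x - 1)) o
                  (Function.update f x (f x - 1) o + 1) := by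
            funext y
            by_cases hy : y = x
            · subst hy
              simp [Function.update, hx]
            · by_cases hyo : y = o <;>
                simp [Function.update, hy, hyo, Ne.symm hx]
          rw [skipF, if_pos (by rw [h1]; simpa using h0), skipF_congr _ _ e1 xs,
            ih _ (by intro y; by_cases hy : y = x <;> simp [Function.update, hy] <;>
              [skip; exact hf y] <;> have := hf x <;> omega),
            skipF, if_pos (by simpa using h0)]

-- main loop invariant: A's fold state is (B's values, skipF of B's counts)
theorem loop_inv (lst : List String) (ol : List String) (vals : List String)
    (d : PySem.Dict String Int) (hd : ∀ x, 0 ≤ d.getD x 0) :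
    ol.foldl (fun (s : List String × List String) o =>
        let o' := PySem.Str.strip o
        if o' ∈ lst then
          (s.1 ++ [o'],
           match PySem.List.remove? s.2 o' with
           | some u => u
           | none => s.2)
        else s) (vals, skipF (fun x => d.getD x 0) lst)
      = (let rb := ol.foldl (fun (s : List String × PySem.Dict String Int) o =>
            let o' := PySem.Str.strip o
            if o' ∈ PySem.Set.ofList lst then
              (s.1 ++ [o'], s.2.insert o' (s.2.getD o' 0 + 1))
            else s) (vals, d)
         (rb.1, skipF (fun x => rb.2.getD x 0) lst)) := by
  induction ol generalizing vals d with
  | nil => simp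
  | cons o os ih =>
      simp only [List.foldl_cons]
      by_cases hm : PySem.Str.strip o ∈ lst
      · rw [if_pos hm, if_pos ((PySem.Set.mem_ofList _ _).mpr hm)]
        have hrm := skipF_inc lst (fun x => d.getD x 0) (PySem.Str.strip o) hd
        simp only at hrm
        rw [← hrm,
          skipF_congr _ _ (getD_fun_insert d (PySem.Str.strip o) (d.getD (PySem.Str.strip o) 0 + 1)).symm lst]
        exact ih _ _ (by
          intro y
          by_cases hy : y = PySem.Str.strip o
          · subst hy; rw [PySem.Dict.getD_insert_self]; have := hd (PySem.Str.strip o); omega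
          · rw [PySem.Dict.getD_insert_of_ne d _ 0 hy]; exact hd y)
      · rw [if_neg hm, if_neg (fun h => hm ((PySem.Set.mem_ofList _ _).mp h))]
        exact ih vals d hd

theorem getD_empty (x : String) : (PySem.Dict.empty : PySem.Dict String Int).getD x 0 = 0 := by
  simp [PySem.Dict.empty, PySem.Dict.getD, PySem.Dict.get?]

-- ===== VERDICT (by name: the statement is the Claim_ definition above) =====
theorem apply_order_to_list_spec : Claim_equal_apply_order_to_list := by
  intro lst order_list _
  unfold Spec_apply_order_to_list apply_order_to_list apply_order_to_list_alt
  simp only [restPass_eq, List.nil_append]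
  have h := loop_inv lst order_list [] PySem.Dict.empty (fun x => by rw [getD_empty])
  rw [skipF_congr _ (fun _ => 0) (funext getD_empty) lst, skipF_zero] at h
  simp only at h
  rw [h]
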